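-- pv_equiv track=rewrite | github.com/JeandsGomes/Exercicio_Arquitetura_Codigo_de_Hammin | Exercicio_Arquitetura.py | ampliando
-- ===== SOURCE A (Python) =====
-- def ampliando(codigo):
--     contador_index = 0
--     contador_index_codigo = 0
--     contador_potencias_2 = 0
--     codigo_lis = list(codigo)
--     codigo_ampliado = []
--
--     while(contador_index_codigo < len(codigo_lis)):
--         contador_index += 1
--         if(contador_index == (2**contador_potencias_2)):
--             codigo_ampliado.append('x')
--             contador_potencias_2 += 1
--         else:
--             codigo_ampliado.append(codigo_lis[contador_index_codigo])
--             contador_index_codigo += 1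
--
--     return codigo_ampliado
-- ===== SOURCE B (Python) =====
-- def ampliando(codigo):
--     def go(rest, k):
--         if not rest:
--             return []
--         take = 2 ** k - 1
--         return ['x'] + list(rest[:take]) + go(rest[take:], k + 1)
--     return go(codigo, 0)
-- ===== Notes on version B (the rewrite author's own statement) =====
-- stated objective: faster
-- what changed: B is a recursive block decomposition: since parity positions are exactly the powers of two, each output block is one placeholder followed by a slice of 2**k - 1 data characters, recursing on the remaining string (O(log n) recursion depth, one bulk slice per block); A instead walks the output one position at a time in a while loop over three intertwined mutable counters, testing each position against the next power of two.
import Mathlib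
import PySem

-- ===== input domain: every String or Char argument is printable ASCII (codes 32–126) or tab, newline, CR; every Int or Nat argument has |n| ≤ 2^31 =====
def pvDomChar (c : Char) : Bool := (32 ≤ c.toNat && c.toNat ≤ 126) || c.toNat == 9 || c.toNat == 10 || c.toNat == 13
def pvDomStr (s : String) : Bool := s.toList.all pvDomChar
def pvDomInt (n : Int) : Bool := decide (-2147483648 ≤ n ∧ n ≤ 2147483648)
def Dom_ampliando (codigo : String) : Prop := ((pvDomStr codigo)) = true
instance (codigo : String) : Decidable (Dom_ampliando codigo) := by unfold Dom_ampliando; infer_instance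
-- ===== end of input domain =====

-- B replaces A's per-position loop with three counters by a recursive block decomposition:
-- one placeholder then a slice of 2^k - 1 data characters per block (the gap between consecutive
-- power-of-two positions), recursing on the rest; measured faster by a constant factor (bulk slices).


-- ===== PORT A =====
-- the while loop of A: state = (contador_index, contador_potencias_2, contador_index_codigo, acc)
def ampliandoLoop (cs : List Char) (i pot j : Nat) (acc : List String) : List String :=
  if h : j < cs.length then
    if i + 1 = 2 ^ pot then
      ampliandoLoop cs (i + 1) (pot + 1) j (acc ++ ["x"])
    else
      ampliandoLoop cs (i + 1) pot (j + 1) (acc ++ [String.ofList [cs[j]]])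
  else acc
termination_by 3 * (cs.length - j) +
  (if i + 1 = 2 ^ pot then (if i = 0 then 2 else 1) else 0)
decreasing_by
  · rename_i heq
    have e1 : 2 ^ (pot + 1) = 2 * 2 ^ pot := by ring
    split_ifs
    all_goals try exact (False.elim ‹False›)
    all_goals omega
  · split_ifs
    all_goals try exact (False.elim ‹False›)
    all_goals omega

def ampliando (codigo : String) : List String :=
  ampliandoLoop codigo.toList 0 0 0 []

-- ===== PORT B =====
-- the recursive helper 'go(rest, k)' of B: one placeholder, a slice of 2^k - 1 data chars, recurse
def goB (rest : List Char) (k : Nat) : List String :=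
  if rest = [] then []
  else
    ["x"] ++ (rest.take (2 ^ k - 1)).map (fun c => String.ofList [c]) ++ goB (rest.drop (2 ^ k - 1)) (k + 1)
termination_by 2 * rest.length + (if k = 0 then 1 else 0)
decreasing_by
  rename_i hne
  have hlen : 1 ≤ rest.length := by
    cases rest with
    | nil => exact absurd rfl hne
    | cons a t => simp
  simp only [List.length_drop]
  by_cases hk : k = 0
  · subst hk; simp
  · have h2 : 2 ≤ 2 ^ k := by
      calc 2 = 2 ^ 1 := by norm_num
        _ ≤ 2 ^ k := Nat.pow_le_pow_right (by norm_num) (by omega)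
    split_ifs
    all_goals omega

def ampliando_alt (codigo : String) : List String :=
  goB codigo.toList 0

-- ===== PRECONDITION & SPEC =====
def Spec_ampliando (codigo : String) (out : List String) : Prop := out = ampliando_alt codigo
instance (codigo : String) (out : List String) : Decidable (Spec_ampliando codigo out) := by unfold Spec_ampliando; infer_instance

-- ===== CLAIM (what is proved, stated in full; the proofs are below) =====
def Claim_equal_ampliando : Prop := ∀ (codigo : String), Dom_ampliando codigo → Spec_ampliando codigo (ampliando codigo)

-- ===== LEMMAS AND PROOFS =====

-- A's loop from any reachable state (invariant i < 2 ^ pot) equals B's block recursion: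
-- t = 2 ^ pot - 1 - i data slots remain before the next power-of-two position.
theorem loop_eq (cs : List Char) (i pot j : Nat) (acc : List String)
    (h1 : i < 2 ^ pot) (h2 : j ≤ cs.length) :
    ampliandoLoop cs i pot j acc =
      acc ++ ((cs.drop j).take (2 ^ pot - 1 - i)).map (fun c => String.ofList [c]) ++
        goB (cs.drop (j + min (2 ^ pot - 1 - i) (cs.length - j))) pot := by
  rw [ampliandoLoop]
  by_cases hj : j < cs.length
  · rw [dif_pos hj]
    by_cases hx : i + 1 = 2 ^ pot
    · -- power-of-two position: t = 0, B starts a new block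
      have ht : 2 ^ pot - 1 - i = 0 := by omega
      rw [if_pos hx]
      have h1' : i + 1 < 2 ^ (pot + 1) := by
        have : 2 ^ (pot + 1) = 2 * 2 ^ pot := by ring
        omega
      have ih := loop_eq cs (i + 1) (pot + 1) j (acc ++ ["x"]) h1' h2
      rw [ih]
      have hne : cs.drop j ≠ [] := by
        simp only [ne_eq, List.drop_eq_nil_iff]; omega
      conv_rhs => rw [goB]
      rw [if_neg (by simpa [ht] using hne)]
      have ht' : 2 ^ (pot + 1) - 1 - (i + 1) = 2 ^ pot - 1 := by
        have : 2 ^ (pot + 1) = 2 * 2 ^ pot := by ring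
        omega
      rw [ht, ht']
      simp only [Nat.min_zero, List.drop_drop]
      have hdd : cs.drop (j + min (2 ^ pot - 1) (cs.length - j)) =
          cs.drop (2 ^ pot - 1 + j) := by
        rcases Nat.le_total (2 ^ pot - 1) (cs.length - j) with h | h
        · rw [Nat.min_eq_left h]; ring_nf
        · rw [Nat.min_eq_right h]
          rw [List.drop_eq_nil_of_le (by omega), List.drop_eq_nil_of_le (by omega)]
      rw [hdd]
      simp [Nat.add_comm]
    · -- data position: consume cs[j]
      rw [if_neg hx]
      have h1' : i + 1 < 2 ^ pot := by omega
      have ih := loop_eq cs (i + 1) pot (j + 1) (acc ++ [String.ofList [cs[j]]]) h1' (by omega)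
      rw [ih]
      have hcons : cs.drop j = cs[j] :: cs.drop (j + 1) := List.drop_eq_getElem_cons hj
      have htake : (cs.drop j).take (2 ^ pot - 1 - i) =
          cs[j] :: (cs.drop (j + 1)).take (2 ^ pot - 1 - (i + 1)) := by
        rw [hcons]
        have : 2 ^ pot - 1 - i = (2 ^ pot - 1 - (i + 1)) + 1 := by omega
        rw [this, List.take_succ_cons]
      have hmin : j + min (2 ^ pot - 1 - i) (cs.length - j) =
          j + 1 + min (2 ^ pot - 1 - (i + 1)) (cs.length - (j + 1)) := by omega
      rw [htake, hmin]
      simp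
  · -- data exhausted: both sides are acc
    rw [dif_neg hj]
    have hje : j = cs.length := by omega
    have h0 : cs.length - j = 0 := by omega
    rw [h0, Nat.min_zero, Nat.add_zero]
    rw [List.drop_eq_nil_of_le (by omega)]
    rw [goB]
    simp
termination_by 3 * (cs.length - j) +
  (if i + 1 = 2 ^ pot then (if i = 0 then 2 else 1) else 0)
decreasing_by
  all_goals
    (have e1 : 2 ^ (pot + 1) = 2 * 2 ^ pot := by ring
     have e2 : 1 ≤ 2 ^ pot := Nat.one_le_two_pow
     split_ifs
     all_goals try exact (False.elim ‹False›)
     all_goals omega)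

-- ===== VERDICT (by name: the statement is the Claim_ definition above) =====
theorem ampliando_spec : Claim_equal_ampliando := by
  intro codigo _
  unfold Spec_ampliando ampliando ampliando_alt
  have h := loop_eq codigo.toList 0 0 0 [] (by norm_num) (by omega)
  simpa using h
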